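-- pv_equiv track=rewrite | github.com/gachouchani1999/CryptoScore | tx_analyzer.py | create_Graph
-- ===== SOURCE A (Python) =====
-- from typing import Dict
--
-- def create_Graph(
--     lst: list, #Hash - Value - Sender - Receiver
-- ) -> Dict:
--     """
--     Creates a weighted directed graph from a list of transactions
--     """
--     Graph = {}
--     for tx in (lst):
--         if tx['sender'] in Graph:
--             if tx["receiver"] in Graph[tx['sender']]:
--                 Graph[tx["sender"]][tx["receiver"]] +=1
--             else:
--                 Graph[tx["sender"]][tx["receiver"]] = 1
--         else:
--             Graph[tx["sender"]] = {tx["receiver"]: 1}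
--     return Graph
-- ===== SOURCE B (Python) =====
-- def create_Graph(
--     lst: list, #Hash - Value - Sender - Receiver
-- ):
--     """
--     Creates a weighted directed graph from a list of transactions
--     (group-by: distinct senders first, then per-sender receiver counts).
--     """
--     edges = [(tx["sender"], tx["receiver"]) for tx in lst]
--     Graph = {}
--     for s in dict.fromkeys(s for s, _ in edges):
--         outs = [r for s2, r in edges if s2 == s]
--         Graph[s] = {r: outs.count(r) for r in dict.fromkeys(outs)}
--     return Graph
-- ===== Notes on version B (the rewrite author's own statement) =====
-- stated objective: simpler
-- what changed: Replaces A's incremental nested-dict build (per-transaction branching on both dict levels) with a group-by shape: extract the edge list, iterate the distinct senders in first-occurrence order, and for each sender build its row by filtering its receivers and counting them with list.count.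
import Mathlib
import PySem

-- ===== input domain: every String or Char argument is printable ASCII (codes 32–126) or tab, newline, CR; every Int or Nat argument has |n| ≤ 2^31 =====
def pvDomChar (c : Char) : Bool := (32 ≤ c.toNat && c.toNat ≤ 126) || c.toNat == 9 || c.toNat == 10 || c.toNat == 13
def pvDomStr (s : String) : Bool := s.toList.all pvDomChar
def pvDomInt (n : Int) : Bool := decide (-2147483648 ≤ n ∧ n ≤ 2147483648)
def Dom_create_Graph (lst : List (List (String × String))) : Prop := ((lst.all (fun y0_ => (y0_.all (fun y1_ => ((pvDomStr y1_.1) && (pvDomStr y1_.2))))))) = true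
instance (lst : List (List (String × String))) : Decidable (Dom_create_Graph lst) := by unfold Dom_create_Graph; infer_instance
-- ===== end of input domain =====

-- B replaces A's incremental nested-dict build with a group-by shape (distinct senders, then per-sender receiver counts); same return value, different traversal.

-- ===== PORT A =====
-- one step of A's loop body; `none` = the KeyError Python raises when 'sender'/'receiver' is missing
def pvAStep (G : PySem.Dict String (PySem.Dict String Int)) (tx : List (String × String)) :
    Option (PySem.Dict String (PySem.Dict String Int)) :=
  match (PySem.Dict.ofList tx).get? "sender", (PySem.Dict.ofList tx).get? "receiver" with
  | some s, some r =>
    match G.get? s with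
    | some inner =>
      match inner.get? r with
      | some c => some (G.insert s (inner.insert r (c + 1)))
      | none   => some (G.insert s (inner.insert r 1))
    | none => some (G.insert s ((PySem.Dict.empty).insert r 1))
  | _, _ => none

def create_Graph (lst : List (List (String × String))) : List (String × List (String × Int)) :=
  match lst.foldl (fun og tx => og.bind (fun G => pvAStep G tx)) (some PySem.Dict.empty) with
  | some G => G.items.map (fun p => (p.1, p.2.items))
  | none => []

-- ===== PORT B =====
-- (tx['sender'], tx['receiver']); `none` = KeyError
def pvTxPair (tx : List (String × String)) : Option (String × String) :=
  match (PySem.Dict.ofList tx).get? "sender", (PySem.Dict.ofList tx).get? "receiver" with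
  | some s, some r => some (s, r)
  | _, _ => none

-- the row for one sender: {r: outs.count(r) for r in dict.fromkeys(outs)} with outs = [r for s2, r in edges if s2 == s]
def pvRow (edges : List (String × String)) (s : String) : PySem.Dict String Int :=
  (PySem.List.dedup ((edges.filter (fun e => e.1 == s)).map Prod.snd)).foldl
    (fun d r => d.insert r (((edges.filter (fun e => e.1 == s)).map Prod.snd).count r : Int))
    PySem.Dict.empty

def create_Graph_alt (lst : List (List (String × String))) : List (String × List (String × Int)) :=
  match lst.mapM pvTxPair with
  | none => []
  | some edges =>
    ((PySem.List.dedup (edges.map Prod.fst)).foldl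
        (fun G s => G.insert s (pvRow edges s)) PySem.Dict.empty).items.map
      (fun p => (p.1, p.2.items))

-- ===== PRECONDITION & SPEC =====
-- Pre_ excludes transactions missing a 'sender' or 'receiver' key, on which A raises KeyError.
def Pre_create_Graph (lst : List (List (String × String))) : Prop :=
  ∀ tx ∈ lst, "sender" ∈ tx.map Prod.fst ∧ "receiver" ∈ tx.map Prod.fst
instance (lst : List (List (String × String))) : Decidable (Pre_create_Graph lst) := by
  unfold Pre_create_Graph; infer_instance
def pvWitness_create_Graph : (List (List (String × String))) :=
  [[("sender", "a"), ("receiver", "b")], [("sender", "a"), ("receiver", "b")], [("sender", "b"), ("receiver", "a")]]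
def Spec_create_Graph (lst : List (List (String × String))) (out : List (String × List (String × Int))) : Prop := out = create_Graph_alt lst
instance (lst : List (List (String × String))) (out : List (String × List (String × Int))) : Decidable (Spec_create_Graph lst out) := by unfold Spec_create_Graph; infer_instance

-- ===== CLAIM (what is proved, stated in full; the proofs are below) =====
def Claim_equal_create_Graph : Prop := ∀ (lst : List (List (String × String))), Dom_create_Graph lst → Pre_create_Graph lst → Spec_create_Graph lst (create_Graph lst)

-- ===== LEMMAS AND PROOFS =====

-- A's branchy loop body, written uniformly (proof-side only)
def pvInc (G : PySem.Dict String (PySem.Dict String Int)) (p : String × String) :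
    PySem.Dict String (PySem.Dict String Int) :=
  G.insert p.1 ((G.getD p.1 PySem.Dict.empty).insert p.2 ((G.getD p.1 PySem.Dict.empty).getD p.2 0 + 1))

lemma pvAStep_map (G : PySem.Dict String (PySem.Dict String Int)) (tx : List (String × String)) :
    pvAStep G tx = (pvTxPair tx).map (fun p => pvInc G p) := by
  unfold pvAStep pvTxPair
  rcases hs : (PySem.Dict.ofList tx).get? "sender" with _ | s <;>
    rcases hr : (PySem.Dict.ofList tx).get? "receiver" with _ | r <;> simp
  unfold pvInc
  rcases hG : G.get? s with _ | inner <;>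
    simp only [PySem.Dict.getD_eq_get?_getD, hG, Option.getD_some, Option.getD_none]
  · simp [PySem.Dict.get?_empty]
  · rcases hi : inner.get? r with _ | c <;> simp

-- A's loop with a per-element KeyError possibility, when no element raises
lemma pvOptFold {σ : Type} (f : σ → (String × String) → σ) :
    ∀ (lst : List (List (String × String))) (st : σ),
      (∀ tx ∈ lst, (pvTxPair tx).isSome = true) →
      lst.foldl (fun o tx => o.bind (fun st => (pvTxPair tx).map (f st))) (some st)
        = some ((lst.filterMap pvTxPair).foldl f st) := by
  intro lst
  induction lst with
  | nil => intro st _; simp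
  | cons tx rest ih =>
    intro st h
    have htx := h tx (by simp)
    rcases hp : pvTxPair tx with _ | p
    · rw [hp] at htx; simp at htx
    · simp only [List.foldl_cons, List.filterMap_cons, hp, Option.bind_some, Option.map_some,
        List.foldl_cons]
      exact ih (f st p) (fun t ht => h t (by simp [ht]))

-- B's comprehension succeeds (and yields the same edge list) when no element raises
lemma pvMapM_eq_filterMap :
    ∀ (lst : List (List (String × String))),
      (∀ tx ∈ lst, (pvTxPair tx).isSome = true) →
      lst.mapM pvTxPair = some (lst.filterMap pvTxPair) := by
  intro lst
  induction lst with
  | nil => intro _; rfl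
  | cons tx rest ih =>
    intro h
    have htx := h tx (by simp)
    rcases hp : pvTxPair tx with _ | p
    · rw [hp] at htx; simp at htx
    · rw [List.mapM_cons, List.filterMap_cons, hp,
        ih (fun t ht => h t (by simp [ht]))]
      rfl

-- A's accumulator, uniformly: keys are the senders in first-occurrence order
lemma pvGA_keys (P : List (String × String)) :
    (P.foldl pvInc PySem.Dict.empty).keys = PySem.Set.ofList (P.map Prod.fst) := by
  rw [show pvInc = fun (G : PySem.Dict String (PySem.Dict String Int)) (p : String × String) =>
        G.insert p.1 ((G.getD p.1 PySem.Dict.empty).insert p.2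
          ((G.getD p.1 PySem.Dict.empty).getD p.2 0 + 1)) from rfl,
    PySem.Dict.keys_foldl_insert_key]
  simp [PySem.Dict.keys_empty, PySem.Set.update_nil_left]

lemma pvGA_nodup (P : List (String × String)) :
    (P.foldl pvInc PySem.Dict.empty).keys.Nodup := by
  rw [pvGA_keys]; exact PySem.Set.nodup_ofList _

-- the row of A's accumulator at sender s is exactly the counter of s's receivers
lemma pvGA_getD (P : List (String × String)) (s : String) :
    (P.foldl pvInc PySem.Dict.empty).getD s PySem.Dict.empty
      = PySem.Dict.counter ((P.filter (fun e => e.1 == s)).map Prod.snd) := by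
  rw [← PySem.Dict.foldl_insert_getD_add_one_eq_counter]
  induction P using List.reverseRecOn with
  | nil => simp [PySem.Dict.getD_empty]
  | append_singleton P e ih =>
    rw [List.foldl_append, List.foldl_cons, List.foldl_nil, List.filter_append]
    by_cases hs : e.1 = s
    · have hb : (e.1 == s) = true := by simp [hs]
      rw [show List.filter (fun e => e.1 == s) [e] = [e] by simp [List.filter, hb]]
      rw [List.map_append, List.foldl_append]
      simp only [List.map_cons, List.map_nil, List.foldl_cons, List.foldl_nil]
      rw [← ih]
      unfold pvInc
      rw [hs, PySem.Dict.getD_insert_self]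
    · have hb : (e.1 == s) = false := by simp [hs]
      rw [show List.filter (fun e => e.1 == s) [e] = [] by simp [List.filter, hb]]
      rw [List.append_nil, ← ih]
      unfold pvInc
      rw [PySem.Dict.getD_insert, if_neg (fun h => hs h.symm)]

-- B's inner fold over fresh distinct receivers lists the counts in order
lemma pvRow_items (edges : List (String × String)) (s : String) :
    (pvRow edges s).items
      = (PySem.Set.ofList ((edges.filter (fun e => e.1 == s)).map Prod.snd)).map
          (fun r => (r, (((edges.filter (fun e => e.1 == s)).map Prod.snd).count r : Int))) := by
  unfold pvRow
  have h := PySem.Dict.items_foldl_insert_fresh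
      (PySem.List.dedup ((edges.filter (fun e => e.1 == s)).map Prod.snd))
      (fun r => r)
      (fun r => (((edges.filter (fun e => e.1 == s)).map Prod.snd).count r : Int))
      PySem.Dict.empty
      (fun a _ => PySem.Dict.contains_empty a)
      (by simp)
  simpa using h

-- ===== VERDICT (by name: the statement is the Claim_ definition above) =====
theorem create_Graph_spec : Claim_equal_create_Graph := by
  intro lst _ hpre
  unfold Spec_create_Graph create_Graph create_Graph_alt
  have hsome : ∀ tx ∈ lst, (pvTxPair tx).isSome = true := by
    intro tx htx
    obtain ⟨hs, hr⟩ := hpre tx htx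
    have h1 : ((PySem.Dict.ofList tx).get? "sender").isSome = true := by
      rw [← PySem.Dict.contains_eq_isSome_get?, PySem.Dict.contains_eq_decide_mem_keys]
      have : "sender" ∈ (PySem.Dict.ofList tx).keys := by
        rw [show PySem.Dict.ofList tx
            = tx.foldl (fun d p => d.insert p.1 p.2) PySem.Dict.empty from rfl,
          PySem.Dict.keys_foldl_insert_key]
        simp only [PySem.Dict.keys_empty, PySem.Set.update_nil_left]
        rw [PySem.Set.mem_ofList]; exact hs
      simpa using this
    have h2 : ((PySem.Dict.ofList tx).get? "receiver").isSome = true := by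
      rw [← PySem.Dict.contains_eq_isSome_get?, PySem.Dict.contains_eq_decide_mem_keys]
      have : "receiver" ∈ (PySem.Dict.ofList tx).keys := by
        rw [show PySem.Dict.ofList tx
            = tx.foldl (fun d p => d.insert p.1 p.2) PySem.Dict.empty from rfl,
          PySem.Dict.keys_foldl_insert_key]
        simp only [PySem.Dict.keys_empty, PySem.Set.update_nil_left]
        rw [PySem.Set.mem_ofList]; exact hr
      simpa using this
    unfold pvTxPair
    rcases hq1 : (PySem.Dict.ofList tx).get? "sender" with _ | v1
    · rw [hq1] at h1; simp at h1
    · rcases hq2 : (PySem.Dict.ofList tx).get? "receiver" with _ | v2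
      · rw [hq2] at h2; simp at h2
      · simp
  rw [show (fun og tx => Option.bind og (fun G => pvAStep G tx))
      = (fun og tx => Option.bind og (fun G => (pvTxPair tx).map (fun p => pvInc G p))) by
    funext og tx; simp [pvAStep_map]]
  rw [pvOptFold _ lst _ hsome, pvMapM_eq_filterMap lst hsome]
  dsimp only
  rw [show (fun (G : PySem.Dict String (PySem.Dict String Int)) (p : String × String) => pvInc G p)
      = pvInc from rfl]
  -- both sides are now pure; name the edge list
  set E := lst.filterMap pvTxPair with hE
  -- A's items, read off key by key
  rw [PySem.Dict.items_eq_map_keys _ (pvGA_nodup E) PySem.Dict.empty, pvGA_keys]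
  -- B's outer fold over fresh distinct senders appends row by row
  have hB := PySem.Dict.items_foldl_insert_fresh
      (PySem.List.dedup (E.map Prod.fst)) (fun s => s) (fun s => pvRow E s)
      PySem.Dict.empty
      (fun a _ => PySem.Dict.contains_empty a)
      (by simp)
  rw [hB, show (PySem.Dict.empty : PySem.Dict String (PySem.Dict String Int)).items = [] from rfl,
    show PySem.List.dedup (E.map Prod.fst) = PySem.Set.ofList (E.map Prod.fst) from rfl]
  simp only [List.nil_append, List.map_map]
  apply List.map_congr_left
  intro s _
  simp only [Function.comp_apply]
  rw [pvGA_getD, pvRow_items, PySem.Dict.items_counter]
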